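-- pv_equiv track=rewrite | github.com/DrDonut326/AdventofCode | 2015/Day 11.py | fix_password
-- ===== SOURCE A (Python) =====
-- def fix_password(password, nexts):
--     bad = ['i', 'l', 'o']
--     ans = ''
--     letters_left = len(password)
--     for letter in password:
--         if letter in password:
--             if letter not in bad:
--                 ans += letter
--                 letters_left -= 1
--             else:
--                 ans += nexts[letter]
--                 letters_left -= 1
--                 ans += 'a' * letters_left
--                 return ans
--     return ans
-- ===== SOURCE B (Python) =====
-- def fix_password(password, nexts):
--     i = next((k for k, c in enumerate(password) if c in 'ilo'), None)
--     if i is None: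
--         return password
--     return password[:i] + nexts[password[i]] + 'a' * (len(password) - i - 1)
-- ===== Notes on version B (the rewrite author's own statement) =====
-- stated objective: simpler
-- what changed: B locates the index of the first forbidden character and builds the answer in one slice-concatenation, replacing A's char-by-char accumulation loop with its always-true membership guard and letters_left counter.
import Mathlib
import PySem

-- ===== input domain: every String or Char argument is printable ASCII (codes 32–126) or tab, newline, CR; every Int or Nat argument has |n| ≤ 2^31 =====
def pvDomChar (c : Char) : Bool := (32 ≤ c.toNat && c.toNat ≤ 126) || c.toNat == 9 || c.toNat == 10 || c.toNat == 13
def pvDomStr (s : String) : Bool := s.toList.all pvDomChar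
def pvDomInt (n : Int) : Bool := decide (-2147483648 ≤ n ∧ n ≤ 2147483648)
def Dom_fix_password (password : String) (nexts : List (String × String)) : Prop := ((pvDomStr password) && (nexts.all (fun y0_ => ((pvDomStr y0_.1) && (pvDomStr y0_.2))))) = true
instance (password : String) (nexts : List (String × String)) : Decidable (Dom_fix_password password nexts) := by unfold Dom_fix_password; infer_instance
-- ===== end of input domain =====

-- B replaces A's char-by-char accumulation loop (with its always-true membership guard and
-- letters_left counter) by locating the first forbidden character and building the answer in
-- one slice-concatenation.

-- nexts[letter]: dict lookup = first match in the association list (value defaulted; Pre_ guarantees presence)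
def pvLookup (nexts : List (String × String)) (k : String) : String :=
  ((nexts.find? (fun p => p.1 == k)).map Prod.snd).getD ""

-- ===== PORT A =====
-- loop over password's characters with state (ans, letters_left); early return on a bad letter
def fixGoA (pw : List Char) (nexts : List (String × String)) :
    List Char → List Char → Int → List Char
  | [], ans, _ => ans
  | c :: rest, ans, left =>
    if pw.contains c then
      if ¬ (['i', 'l', 'o'].contains c) then
        fixGoA pw nexts rest (ans ++ [c]) (left - 1)
      else
        (ans ++ (pvLookup nexts (String.ofList [c])).toList) ++ List.replicate (left - 1).toNat 'a'
    else
      fixGoA pw nexts rest ans left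

def fix_password (password : String) (nexts : List (String × String)) : String :=
  String.ofList (fixGoA password.toList nexts password.toList [] (password.toList.length : Int))

-- ===== PORT B =====
def fix_password_alt (password : String) (nexts : List (String × String)) : String :=
  let cs := password.toList
  match cs.findIdx? (fun c => c == 'i' || c == 'l' || c == 'o') with
  | none => password
  | some i =>
      String.ofList (cs.take i ++ (pvLookup nexts (String.ofList [cs.getD i ' '])).toList
                 ++ List.replicate (cs.length - i - 1) 'a')

-- ===== PRECONDITION & SPEC =====
-- Pre_ excludes exactly the inputs where A raises KeyError: a forbidden character occurs and its
-- (first) occurrence is not a key of nexts.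
def Pre_fix_password (password : String) (nexts : List (String × String)) : Prop :=
  ((password.toList.find? (fun c => c == 'i' || c == 'l' || c == 'o')).all
    (fun c => (nexts.find? (fun p => p.1 == String.ofList [c])).isSome)) = true
instance (password : String) (nexts : List (String × String)) : Decidable (Pre_fix_password password nexts) := by unfold Pre_fix_password; infer_instance

def pvWitness_fix_password : String × (List (String × String)) := ("ghijk", [("i", "j"), ("l", "m"), ("o", "p")])

def Spec_fix_password (password : String) (nexts : List (String × String)) (out : String) : Prop := out = fix_password_alt password nexts
instance (password : String) (nexts : List (String × String)) (out : String) : Decidable (Spec_fix_password password nexts out) := by unfold Spec_fix_password; infer_instance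

-- ===== CLAIM (what is proved, stated in full; the proofs are below) =====
def Claim_equal_fix_password : Prop := ∀ (password : String) (nexts : List (String × String)), Dom_fix_password password nexts → Pre_fix_password password nexts → Spec_fix_password password nexts (fix_password password nexts)

-- ===== LEMMAS AND PROOFS =====

-- core of B on a char list
def altCore (nexts : List (String × String)) (cs : List Char) : List Char :=
  match cs.findIdx? (fun c => c == 'i' || c == 'l' || c == 'o') with
  | none => cs
  | some i =>
      cs.take i ++ (pvLookup nexts (String.ofList [cs.getD i ' '])).toList
        ++ List.replicate (cs.length - i - 1) 'a'

theorem fixGoA_eq_altCore (nexts : List (String × String)) :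
    ∀ (cs pw ans : List Char), (∀ c ∈ cs, c ∈ pw) →
      fixGoA pw nexts cs ans (cs.length : Int) = ans ++ altCore nexts cs := by
  intro cs
  induction cs with
  | nil => intro pw ans _; simp [fixGoA, altCore]
  | cons c rest ih =>
    intro pw ans hsub
    have hc : pw.contains c := by
      exact (List.contains_iff_mem).mpr (hsub c (by simp))
    have hcm : c ∈ pw := hsub c (by simp)
    by_cases hbad : (['i', 'l', 'o'].contains c)
    · have hb : c = 'i' ∨ c = 'l' ∨ c = 'o' := by
        simp only [List.contains_iff_mem] at hbad; simpa using hbad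
      have hfind : (c :: rest).findIdx? (fun c => c == 'i' || c == 'l' || c == 'o') = some 0 := by
        rw [List.findIdx?_cons]
        rcases hb with h | h | h <;> simp [h]
      have hlen : ((↑(c :: rest).length : Int) - 1).toNat = rest.length := by
        simp only [List.length_cons]; omega
      simp only [fixGoA]
      rw [if_pos hc, if_neg (not_not_intro hbad)]
      simp [altCore, hfind]
    · have hb : ¬c = 'i' ∧ ¬c = 'l' ∧ ¬c = 'o' := by
        simp only [List.contains_iff_mem] at hbad; simpa using hbad
      have hstep : ((c :: rest).length : Int) - 1 = (rest.length : Int) := by simp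
      have hnb : ¬(c == 'i' || c == 'l' || c == 'o') = true := by simp; tauto
      have hfind : (c :: rest).findIdx? (fun c => c == 'i' || c == 'l' || c == 'o')
          = (rest.findIdx? (fun c => c == 'i' || c == 'l' || c == 'o')).map (· + 1) := by
        rw [List.findIdx?_cons]; simp [hnb]
      have hrec := ih pw (ans ++ [c]) (fun x hx => hsub x (by simp [hx]))
      have hred : fixGoA pw nexts (c :: rest) ans ((c :: rest).length : Int)
          = fixGoA pw nexts rest (ans ++ [c]) (((c :: rest).length : Int) - 1) := by
        simp only [fixGoA]
        rw [if_pos hc, if_pos hbad]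
      rw [hred, hstep, hrec]
      unfold altCore
      rw [hfind]
      cases hr : rest.findIdx? (fun c => c == 'i' || c == 'l' || c == 'o') with
      | none => simp
      | some i =>
        have hi : i < rest.length := (List.findIdx?_eq_some_iff_findIdx_eq.mp hr).1
        simp only [Option.map_some]
        rw [List.getD, List.getD]
        simp [List.take_succ_cons, List.length_cons]

-- ===== VERDICT (by name: the statement is the Claim_ definition above) =====
theorem fix_password_spec : Claim_equal_fix_password := by
  intro password nexts _ _
  unfold Spec_fix_password fix_password fix_password_alt
  rw [fixGoA_eq_altCore nexts password.toList password.toList [] (fun c h => h)]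
  simp only [List.nil_append]
  unfold altCore
  cases h : password.toList.findIdx? (fun c => c == 'i' || c == 'l' || c == 'o') with
  | none => exact String.ofList_toList
  | some i => rfl
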